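-- pv_equiv track=rewrite | github.com/Nagar203/Leetcode | 2425. Bitwise XOR of All Pairings/Approach01.py | xorAllNums
-- ===== SOURCE A (Python) =====
-- from typing import List
--
-- def xorAllNums(nums1: List[int], nums2: List[int]) -> int:
--     resultXor = 0
--
--     # If nums2 has an odd number of elements, XOR all elements of nums1
--     if len(nums2) % 2 != 0:
--         for num in nums1:
--             resultXor ^= num
--
--     # If nums1 has an odd number of elements, XOR all elements of nums2
--     if len(nums1) % 2 != 0:
--         for num in nums2:
--             resultXor ^= num
--
--     return resultXor
-- ===== SOURCE B (Python) =====
-- from typing import List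
--
-- def xorAllNums(nums1: List[int], nums2: List[int]) -> int:
--     result = 0
--     for num1 in nums1:
--         for num2 in nums2:
--             result ^= (num1 ^ num2)
--     return result
-- ===== Notes on version B (the rewrite author's own statement) =====
-- stated objective: alternative
-- what changed: Replaces A's parity shortcut (two conditional single passes guarded by the other list's length parity) with the direct brute force: XOR num1^num2 over the whole cartesian product of pairs.
import Mathlib
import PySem

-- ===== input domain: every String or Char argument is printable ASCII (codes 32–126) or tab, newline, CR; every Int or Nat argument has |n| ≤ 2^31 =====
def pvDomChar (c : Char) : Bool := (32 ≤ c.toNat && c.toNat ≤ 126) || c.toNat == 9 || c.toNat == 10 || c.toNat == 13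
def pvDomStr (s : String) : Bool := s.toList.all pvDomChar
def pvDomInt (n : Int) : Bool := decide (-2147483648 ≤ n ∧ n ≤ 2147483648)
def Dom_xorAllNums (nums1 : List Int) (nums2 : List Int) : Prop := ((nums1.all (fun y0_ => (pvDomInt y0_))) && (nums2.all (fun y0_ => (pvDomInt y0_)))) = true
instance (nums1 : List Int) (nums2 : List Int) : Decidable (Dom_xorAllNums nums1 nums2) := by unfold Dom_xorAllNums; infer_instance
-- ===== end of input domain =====

-- B replaces A's parity shortcut with the direct brute force over all pairs (alternative decomposition, not faster).

-- ===== PORT A =====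
-- A: resultXor = 0; if len(nums2) odd, XOR in all of nums1; if len(nums1) odd, XOR in all of nums2.
def xorAllNums (nums1 : List Int) (nums2 : List Int) : Int :=
  let resultXor : Int := 0
  let resultXor :=
    if nums2.length % 2 ≠ 0 then
      nums1.foldl (fun r num => PySem.Int.bxor r num) resultXor
    else resultXor
  let resultXor :=
    if nums1.length % 2 ≠ 0 then
      nums2.foldl (fun r num => PySem.Int.bxor r num) resultXor
    else resultXor
  resultXor

-- ===== PORT B =====
-- B: result = 0; for num1 in nums1: for num2 in nums2: result ^= (num1 ^ num2).
def xorAllNums_alt (nums1 : List Int) (nums2 : List Int) : Int :=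
  nums1.foldl
    (fun result num1 =>
      nums2.foldl (fun result num2 => PySem.Int.bxor result (PySem.Int.bxor num1 num2)) result)
    0

-- ===== PRECONDITION & SPEC =====
def Spec_xorAllNums (nums1 : List Int) (nums2 : List Int) (out : Int) : Prop := out = xorAllNums_alt nums1 nums2
instance (nums1 : List Int) (nums2 : List Int) (out : Int) : Decidable (Spec_xorAllNums nums1 nums2 out) := by unfold Spec_xorAllNums; infer_instance

-- ===== CLAIM (what is proved, stated in full; the proofs are below) =====
def Claim_equal_xorAllNums : Prop := ∀ (nums1 : List Int) (nums2 : List Int), Dom_xorAllNums nums1 nums2 → Spec_xorAllNums nums1 nums2 (xorAllNums nums1 nums2)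

-- ===== LEMMAS AND PROOFS =====

-- sign/magnitude encoding of an Int, under which bxor acts componentwise
def pvEnc (s : Bool) (m : Nat) : Int := if s then -(m : Int) - 1 else (m : Int)

theorem pvEnc_surj (a : Int) : ∃ s m, a = pvEnc s m := by
  rcases (by omega : 0 ≤ a ∨ a < 0) with h | h
  · exact ⟨false, a.toNat, by simp [pvEnc, Int.toNat_of_nonneg h]⟩
  · refine ⟨true, (-a - 1).toNat, ?_⟩
    simp only [pvEnc, if_pos]
    omega

theorem bxor_enc (s1 s2 : Bool) (m1 m2 : Nat) :
    PySem.Int.bxor (pvEnc s1 m1) (pvEnc s2 m2) = pvEnc (xor s1 s2) (m1 ^^^ m2) := by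
  have h1 : ∀ m : Nat, ((m : Int)).toNat = m := fun m => Int.toNat_natCast m
  have h2 : ∀ m : Nat, (-(-(m : Int) - 1) - 1).toNat = m := fun m => by omega
  have h3 : ∀ m : Nat, ¬ (0 : Int) ≤ -(m : Int) - 1 := fun m => by omega
  have h4 : ∀ m : Nat, ¬ (1 : Int) ≤ -(m : Int) := fun m => by omega
  cases s1 <;> cases s2 <;>
    simp [pvEnc, PySem.Int.bxor, h1, h2, h3, h4, Int.natCast_nonneg]

theorem bxor_assoc (a b c : Int) :
    PySem.Int.bxor (PySem.Int.bxor a b) c = PySem.Int.bxor a (PySem.Int.bxor b c) := by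
  obtain ⟨s1, m1, rfl⟩ := pvEnc_surj a
  obtain ⟨s2, m2, rfl⟩ := pvEnc_surj b
  obtain ⟨s3, m3, rfl⟩ := pvEnc_surj c
  simp [bxor_enc, Bool.xor_assoc, Nat.xor_assoc]

theorem bxor_left_comm (a b c : Int) :
    PySem.Int.bxor a (PySem.Int.bxor b c) = PySem.Int.bxor b (PySem.Int.bxor a c) := by
  rw [← bxor_assoc, PySem.Int.bxor_comm a b, bxor_assoc]

theorem bxor_cancel_left (a b : Int) : PySem.Int.bxor a (PySem.Int.bxor a b) = b := by
  rw [← bxor_assoc, PySem.Int.bxor_self, PySem.Int.bxor_comm, PySem.Int.bxor_zero]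

theorem zero_bxor (a : Int) : PySem.Int.bxor 0 a = a := by
  rw [PySem.Int.bxor_comm, PySem.Int.bxor_zero]

-- pull the accumulator out of a plain XOR fold
theorem foldl_bxor_acc (l : List Int) (a : Int) :
    l.foldl (fun r num => PySem.Int.bxor r num) a
      = PySem.Int.bxor a (l.foldl (fun r num => PySem.Int.bxor r num) 0) := by
  induction l generalizing a with
  | nil => simp [PySem.Int.bxor_zero]
  | cons h t ih =>
    simp only [List.foldl_cons]
    rw [ih (PySem.Int.bxor a h), ih (PySem.Int.bxor 0 h), zero_bxor, bxor_assoc]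

-- B's inner loop over nums2, for a fixed num1
theorem inner_fold (l : List Int) (n1 r : Int) :
    l.foldl (fun result num2 => PySem.Int.bxor result (PySem.Int.bxor n1 num2)) r
      = PySem.Int.bxor r (PySem.Int.bxor (if l.length % 2 = 1 then n1 else 0)
          (l.foldl (fun x y => PySem.Int.bxor x y) 0)) := by
  induction l generalizing r with
  | nil => simp [PySem.Int.bxor_zero]
  | cons h t ih =>
    simp only [List.foldl_cons]
    rw [ih, foldl_bxor_acc t (PySem.Int.bxor 0 h), zero_bxor]
    have hpar : (h :: t).length % 2 = 1 ↔ ¬ (t.length % 2 = 1) := by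
      simp only [List.length_cons]; omega
    by_cases hp : t.length % 2 = 1
    · rw [if_pos hp, if_neg (by simp only [List.length_cons]; omega)]
      simp [bxor_assoc, bxor_left_comm, bxor_cancel_left, zero_bxor,
        PySem.Int.bxor_comm, PySem.Int.bxor_self, PySem.Int.bxor_zero]
    · rw [if_neg hp, if_pos (hpar.mpr hp)]
      simp [bxor_assoc, bxor_left_comm, bxor_cancel_left, zero_bxor,
        PySem.Int.bxor_comm, PySem.Int.bxor_self, PySem.Int.bxor_zero]

-- B's outer loop, characterised by the two parity conditions
theorem outer_fold (l1 l2 : List Int) (r : Int) :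
    l1.foldl
      (fun result num1 =>
        l2.foldl (fun result num2 => PySem.Int.bxor result (PySem.Int.bxor num1 num2)) result) r
      = PySem.Int.bxor r (PySem.Int.bxor
          (if l2.length % 2 = 1 then l1.foldl (fun x y => PySem.Int.bxor x y) 0 else 0)
          (if l1.length % 2 = 1 then l2.foldl (fun x y => PySem.Int.bxor x y) 0 else 0)) := by
  induction l1 generalizing r with
  | nil => simp [PySem.Int.bxor_zero]
  | cons h t ih =>
    simp only [List.foldl_cons]
    rw [inner_fold l2 h r, ih, foldl_bxor_acc t (PySem.Int.bxor 0 h), zero_bxor]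
    have hpar : (h :: t).length % 2 = 1 ↔ ¬ (t.length % 2 = 1) := by
      simp only [List.length_cons]; omega
    by_cases hp : t.length % 2 = 1 <;>
      by_cases hq : l2.length % 2 = 1 <;>
        simp only [if_pos, if_neg, hp, hq, hpar, not_true, not_false_iff, if_true, if_false,
          iff_true, iff_false] <;>
        simp [bxor_assoc, bxor_left_comm, bxor_cancel_left, zero_bxor,
          PySem.Int.bxor_comm, PySem.Int.bxor_self, PySem.Int.bxor_zero]

-- ===== VERDICT (by name: the statement is the Claim_ definition above) =====
theorem xorAllNums_spec : Claim_equal_xorAllNums := by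
  intro nums1 nums2 _
  show xorAllNums nums1 nums2 = xorAllNums_alt nums1 nums2
  unfold xorAllNums xorAllNums_alt
  rw [outer_fold nums1 nums2 0, zero_bxor]
  have h2 : ∀ n : Nat, (n % 2 ≠ 0) = (n % 2 = 1) := by intro n; apply propext; constructor <;> omega
  have key := foldl_bxor_acc nums2 (nums1.foldl (fun r num => PySem.Int.bxor r num) 0)
  by_cases hp : nums1.length % 2 = 1 <;> by_cases hq : nums2.length % 2 = 1 <;>
    simp [h2, hp, hq, key, zero_bxor]
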